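-- pv_equiv track=rewrite | github.com/epoyraz/leetcode | solutions/205.py | transform
-- ===== SOURCE A (Python) =====
-- def transform(s):
--     mapping = {}
--     res = []
--     count = 0
--     for c in s:
--         if c not in mapping:
--             mapping[c] = count
--             count += 1
--         res.append(mapping[c])
--     return res
-- ===== SOURCE B (Python) =====
-- def transform(s):
--     code = {c: len(set(s[:s.index(c)])) for c in dict.fromkeys(s)}
--     return [code[c] for c in s]
-- ===== Notes on version B (the rewrite author's own statement) =====
-- stated objective: alternative
-- what changed: A assigns codes with an incremental counter while interleaving dict-building and output in one stateful pass; B has no counter at all: it computes each distinct character's code directly by the positional formula len(set(s[:s.index(c)])) (number of distinct characters strictly before its first occurrence) and then maps the string through that table.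
import Mathlib
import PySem

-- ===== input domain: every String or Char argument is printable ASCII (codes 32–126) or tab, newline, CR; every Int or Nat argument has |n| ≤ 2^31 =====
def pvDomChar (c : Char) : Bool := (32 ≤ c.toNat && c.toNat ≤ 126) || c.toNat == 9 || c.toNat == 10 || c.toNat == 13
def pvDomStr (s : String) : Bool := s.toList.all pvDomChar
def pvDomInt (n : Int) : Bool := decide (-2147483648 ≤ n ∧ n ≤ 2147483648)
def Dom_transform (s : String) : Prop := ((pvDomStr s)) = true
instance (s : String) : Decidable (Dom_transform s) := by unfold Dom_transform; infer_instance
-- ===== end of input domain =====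

-- B replaces A's stateful dict/counter pass by a stateless positional formula: each output is the
-- number of distinct characters strictly before the first occurrence of that character (alternative
-- decomposition, same result, quadratic instead of linear).

-- ===== PORT A =====
-- the for-loop over s with state (mapping, res, count)
def transformLoop : List Char → PySem.Dict Char Int → List Int → Int → List Int
  | [], _, res, _ => res
  | c :: rest, mapping, res, count =>
    if mapping.contains c then
      -- res.append(mapping[c]); key c is present, so Python's mapping[c] is getD c 0 here
      transformLoop rest mapping (res ++ [mapping.getD c 0]) count
    else
      -- mapping[c] = count; count += 1; res.append(mapping[c])
      transformLoop rest (mapping.insert c count) (res ++ [(mapping.insert c count).getD c 0]) (count + 1)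

def transform (s : String) : List Int :=
  transformLoop s.toList PySem.Dict.empty [] 0

-- ===== PORT B =====
-- code = {c: len(set(s[:s.index(c)])) for c in dict.fromkeys(s)}; every c here is in s, so
-- Python's s.index(c) never raises and equals List.idxOf on s.toList; s[:k] is take k,
-- set(...) is PySem.Set.ofList, len is length, dict.fromkeys(s) is PySem.List.dedup
def transformCode (l : List Char) : PySem.Dict Char Int :=
  (PySem.List.dedup l).foldl
    (fun d c => d.insert c ((PySem.Set.ofList (l.take (l.idxOf c))).length : Int))
    PySem.Dict.empty

-- [code[c] for c in s]: every c of s is a key of code, so Python's code[c] is getD c 0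
def transform_alt (s : String) : List Int :=
  s.toList.map (fun c => (transformCode s.toList).getD c 0)

-- ===== PRECONDITION & SPEC =====
def Spec_transform (s : String) (out : List Int) : Prop := out = transform_alt s
instance (s : String) (out : List Int) : Decidable (Spec_transform s out) := by unfold Spec_transform; infer_instance

-- ===== CLAIM (what is proved, stated in full; the proofs are below) =====
def Claim_equal_transform : Prop := ∀ (s : String), Dom_transform s → Spec_transform s (transform s)

-- ===== LEMMAS AND PROOFS =====

-- proof-side helper: the dict A's loop has built after consuming the distinct chars o
def transformTable (order : List Char) : PySem.Dict Char Int :=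
  (PySem.List.enumerate order 0).foldl (fun d p => d.insert p.2 p.1) PySem.Dict.empty

-- the table maps each member of a duplicate-free list to its index
lemma transformTable_getD (o : List Char) (ho : o.Nodup) {c : Char} (hc : c ∈ o) :
    (transformTable o).getD c 0 = (o.idxOf c : Int) := by
  have hfresh : ∀ p ∈ PySem.List.enumerate o 0, (PySem.Dict.empty (κ := Char) (ν := Int)).contains p.2 = false := by
    intro p _; simp [PySem.Dict.contains_empty]
  have hnodup : ((PySem.List.enumerate o 0).map (·.2)).Nodup := by
    simpa [PySem.List.map_snd_enumerate] using ho
  have hitems : (transformTable o).items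
      = (PySem.Dict.empty (κ := Char) (ν := Int)).items
        ++ (PySem.List.enumerate o 0).map (fun p => (p.2, p.1)) := by
    simpa [transformTable] using
      PySem.Dict.items_foldl_insert_fresh (l := PySem.List.enumerate o 0)
        (k := (·.2)) (v := (·.1)) (d := PySem.Dict.empty) hfresh hnodup
  have hklt : o.idxOf c < o.length := List.idxOf_lt_length_of_mem hc
  have hmem : (c, (o.idxOf c : Int)) ∈ (transformTable o).items := by
    rw [hitems]
    refine List.mem_append.mpr (Or.inr ?_)
    have hmem0 : ((o.idxOf c : Int), o[o.idxOf c]) ∈ PySem.List.enumerate o 0 := by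
      rw [PySem.List.mem_enumerate_iff]
      exact ⟨o.idxOf c, hklt, by simp⟩
    simpa [List.getElem_idxOf hklt] using
      List.mem_map_of_mem (f := fun p => (p.2, p.1)) hmem0
  have hkeys : (transformTable o).keys.Nodup := by
    simpa [transformTable] using
      PySem.Dict.nodup_keys_foldl_insert_key (l := PySem.List.enumerate o 0)
        (key := (·.2)) (f := fun d p => p.1) (d := PySem.Dict.empty)
        (by simp [PySem.Dict.keys_empty])
  exact PySem.Dict.getD_of_mem_items _ hmem hkeys 0

lemma transformTable_keys (o : List Char) (ho : o.Nodup) :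
    (transformTable o).keys = o := by
  have h := PySem.Dict.keys_foldl_insert_key (l := PySem.List.enumerate o 0)
      (key := (·.2)) (f := fun d p => p.1) (d := PySem.Dict.empty (κ := Char) (ν := Int))
  simpa [transformTable, PySem.Dict.keys_empty, PySem.List.map_snd_enumerate,
    PySem.Set.update_nil_left, PySem.Set.ofList_eq_self_of_nodup o ho] using h

-- appending one element extends the table by one insert
lemma transformTable_append (o : List Char) (c : Char) :
    transformTable (o ++ [c]) = (transformTable o).insert c (o.length : Int) := by
  simp [transformTable, PySem.List.enumerate_append, PySem.List.enumerate_cons,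
    PySem.List.enumerate_nil, List.foldl_append]

-- member's index is unchanged when the set is only extended on the right
lemma idxOf_update (o : List Char) (l : List Char) {c : Char} (hc : c ∈ o) :
    (PySem.Set.update o l).idxOf c = o.idxOf c := by
  rw [PySem.Set.update_eq_append_filter]
  exact List.idxOf_append_of_mem hc

-- A's loop, started from the table for the distinct chars seen so far, emits first-occurrence indices
lemma transformLoop_eq (l : List Char) : ∀ (o : List Char) (res : List Int), o.Nodup →
    transformLoop l (transformTable o) res (o.length : Int)
      = res ++ l.map (fun c => ((PySem.Set.update o l).idxOf c : Int)) := by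
  induction l with
  | nil => intro o res _; simp [transformLoop, PySem.Set.update]
  | cons c rest ih =>
    intro o res ho
    have hkeys := transformTable_keys o ho
    have hcontains : (transformTable o).contains c = decide (c ∈ o) := by
      rw [PySem.Dict.contains_eq_decide_mem_keys, hkeys]
    by_cases hc : c ∈ o
    · have hct : (transformTable o).contains c = true := by rw [hcontains]; simpa using hc
      rw [transformLoop, if_pos hct, transformTable_getD o ho hc, ih o _ ho]
      have hset : PySem.Set.update o (c :: rest) = PySem.Set.update o rest := by
        simp [PySem.Set.update_cons, PySem.Set.add, PySem.Set.contains, hc]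
      rw [List.map_cons, hset, idxOf_update o rest hc]
      simp
    · have hcf : (transformTable o).contains c = false := by rw [hcontains]; simpa using hc
      rw [transformLoop, if_neg (by simp [hcf])]
      have ho' : (o ++ [c]).Nodup :=
        List.Nodup.append ho (List.nodup_singleton c) (by simpa [List.disjoint_singleton] using hc)
      have hlen : ((o ++ [c]).length : Int) = (o.length : Int) + 1 := by simp
      rw [← transformTable_append o c,
        transformTable_getD (o ++ [c]) ho' (c := c) (by simp), ← hlen, ih (o ++ [c]) _ ho']
      have hidx : (o ++ [c]).idxOf c = o.length := by
        rw [List.idxOf_append_of_notMem hc]; simp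
      have hset : PySem.Set.update o (c :: rest) = PySem.Set.update (o ++ [c]) rest := by
        simp [PySem.Set.update_cons, PySem.Set.add, PySem.Set.contains, hc]
      have hmemc : c ∈ o ++ [c] := by simp
      rw [List.map_cons, hset, idxOf_update (o ++ [c]) rest hmemc, hidx]
      simp

-- an element never occurs strictly before its first occurrence
lemma not_mem_take_idxOf (l : List Char) (c : Char) : c ∉ l.take (l.idxOf c) := by
  intro h
  exact lt_irrefl _ ((List.mem_take_iff_idxOf_lt (List.mem_of_mem_take h)).mp h)

-- first-occurrence index in the dedup list = number of distinct chars before the first occurrence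
lemma idxOf_ofList_eq (l : List Char) {c : Char} (hc : c ∈ l) :
    (PySem.Set.ofList l).idxOf c = (PySem.Set.ofList (l.take (l.idxOf c))).length := by
  have hk : l.idxOf c < l.length := List.idxOf_lt_length_of_mem hc
  have hdrop : l.drop (l.idxOf c) = c :: l.drop (l.idxOf c + 1) := by
    rw [List.drop_eq_getElem_cons hk, List.getElem_idxOf hk]
  have hsplit : l = l.take (l.idxOf c) ++ l.drop (l.idxOf c) := (List.take_append_drop _ _).symm
  have hnotmem : c ∉ PySem.Set.ofList (l.take (l.idxOf c)) := by
    rw [PySem.Set.mem_ofList]; exact not_mem_take_idxOf l c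
  have hadd : PySem.Set.add (PySem.Set.ofList (l.take (l.idxOf c))) c
      = PySem.Set.ofList (l.take (l.idxOf c)) ++ [c] := by
    simp [PySem.Set.add, PySem.Set.contains, hnotmem]
  conv_lhs => rw [hsplit]
  rw [PySem.Set.ofList_append, hdrop, PySem.Set.update_cons, hadd,
    idxOf_update _ _ (by simp), List.idxOf_append_of_notMem hnotmem]
  simp

-- B's table maps each character of l to its formula value
lemma transformCode_getD (l : List Char) {c : Char} (hc : c ∈ l) :
    (transformCode l).getD c 0 = ((PySem.Set.ofList (l.take (l.idxOf c))).length : Int) := by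
  have hfresh : ∀ x ∈ PySem.List.dedup l, (PySem.Dict.empty (κ := Char) (ν := Int)).contains x = false := by
    intro x _; simp [PySem.Dict.contains_empty]
  have hnodup : ((PySem.List.dedup l).map id).Nodup := by
    simp only [List.map_id]; exact PySem.List.nodup_dedup l
  have hitems : (transformCode l).items
      = (PySem.Dict.empty (κ := Char) (ν := Int)).items
        ++ (PySem.List.dedup l).map
            (fun c => (c, ((PySem.Set.ofList (l.take (l.idxOf c))).length : Int))) := by
    simpa [transformCode] using
      PySem.Dict.items_foldl_insert_fresh (l := PySem.List.dedup l)
        (k := id) (v := fun c => ((PySem.Set.ofList (l.take (l.idxOf c))).length : Int))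
        (d := PySem.Dict.empty) (by simp) hnodup
  have hmem : (c, ((PySem.Set.ofList (l.take (l.idxOf c))).length : Int)) ∈ (transformCode l).items := by
    rw [hitems]
    refine List.mem_append.mpr (Or.inr ?_)
    exact List.mem_map_of_mem (by simpa [PySem.List.mem_dedup] using hc)
  have hkeys : (transformCode l).keys.Nodup := by
    have h := PySem.Dict.keys_foldl_insert (l := PySem.List.dedup l)
        (f := fun d c => ((PySem.Set.ofList (l.take (l.idxOf c))).length : Int))
        (d := PySem.Dict.empty (κ := Char) (ν := Int))
    rw [transformCode, h, PySem.Dict.keys_empty, PySem.Set.update_nil_left]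
    exact PySem.Set.nodup_ofList _
  exact PySem.Dict.getD_of_mem_items _ hmem hkeys 0

-- ===== VERDICT (by name: the statement is the Claim_ definition above) =====
theorem transform_spec : Claim_equal_transform := by
  intro s _
  unfold Spec_transform transform transform_alt
  have h0 : (PySem.Dict.empty : PySem.Dict Char Int) = transformTable [] := rfl
  have := transformLoop_eq s.toList [] [] List.nodup_nil
  simp only [List.length_nil, Nat.cast_zero] at this
  rw [h0, this, List.nil_append]
  apply List.map_congr_left
  intro c hc
  rw [PySem.Set.update_nil_left, idxOf_ofList_eq s.toList hc, transformCode_getD s.toList hc]
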